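-- pv_equiv track=rewrite | github.com/Zettersten/zettersten.com | scripts/weekly_editorial.py | parse_title_meta
-- ===== SOURCE A (Python) =====
-- def parse_title_meta(text: str) -> tuple[str, str, str]:
--     title = "Weekly AI Systems Brief"
--     meta = "Weekly analysis across AI, systems, labor, and leadership dynamics."
--     social = "New weekly: where AI, labor, and systems strategy collide."
--     for line in text.splitlines():
--         if line.lower().startswith("seo title:"):
--             title = line.split(":", 1)[1].strip()
--         if line.lower().startswith("meta description:"):
--             meta = line.split(":", 1)[1].strip()
--         if line.lower().startswith("suggested social headline:"):
--             social = line.split(":", 1)[1].strip()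
--     return title[:70], meta[:155], social
-- ===== SOURCE B (Python) =====
-- def parse_title_meta(text: str) -> tuple[str, str, str]:
--     lines = text.splitlines()
--
--     def last_field(prefix: str, default: str) -> str:
--         for line in reversed(lines):
--             if line.lower().startswith(prefix):
--                 return line.split(":", 1)[1].strip()
--         return default
--
--     title = last_field("seo title:", "Weekly AI Systems Brief")
--     meta = last_field("meta description:",
--                       "Weekly analysis across AI, systems, labor, and leadership dynamics.")
--     social = last_field("suggested social headline:",
--                         "New weekly: where AI, labor, and systems strategy collide.")
--     return title[:70], meta[:155], social
-- ===== Notes on version B (the rewrite author's own statement) =====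
-- stated objective: simpler
-- what changed: Replaces the single loop mutating three variables with one helper called three times, each scanning reversed(lines) and returning the first (i.e. last overall) matching field, with an early return instead of overwrite-until-end.
import Mathlib
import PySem

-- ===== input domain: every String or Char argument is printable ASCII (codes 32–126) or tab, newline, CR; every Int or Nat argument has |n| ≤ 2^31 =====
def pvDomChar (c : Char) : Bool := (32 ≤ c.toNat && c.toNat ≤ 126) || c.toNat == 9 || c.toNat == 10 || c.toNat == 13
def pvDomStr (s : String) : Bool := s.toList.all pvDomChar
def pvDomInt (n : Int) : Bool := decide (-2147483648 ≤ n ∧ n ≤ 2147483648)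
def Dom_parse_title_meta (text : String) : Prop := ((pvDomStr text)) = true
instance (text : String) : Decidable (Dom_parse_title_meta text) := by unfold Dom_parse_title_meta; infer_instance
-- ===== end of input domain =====

-- B replaces A's single loop over three mutable variables with a helper called three
-- times, each scanning the reversed line list for the first (= last overall) match
-- (objective: simpler decomposition; same cost).

-- ===== PORT A =====
-- line.split(":", 1)[1].strip() — only evaluated on lines that start (lowercased)
-- with a prefix containing ':', so the split always has a second part; the getD
-- defaults are unreachable there.
def pvExtract (line : String) : String :=
  PySem.Str.strip (((PySem.Str.splitMax? line ":" 1).getD []).getD 1 "")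

-- the loop body of A's for-loop over (title, meta, social)
def pvStep (st : String × String × String) (line : String) : String × String × String :=
  let st := if PySem.Str.startswith (PySem.Str.lower line) "seo title:" then
              (pvExtract line, st.2.1, st.2.2) else st
  let st := if PySem.Str.startswith (PySem.Str.lower line) "meta description:" then
              (st.1, pvExtract line, st.2.2) else st
  if PySem.Str.startswith (PySem.Str.lower line) "suggested social headline:" then
    (st.1, st.2.1, pvExtract line) else st

def parse_title_meta (text : String) : String × String × String :=
  let st := (PySem.Str.splitlines text).foldl pvStep
    ("Weekly AI Systems Brief",
     "Weekly analysis across AI, systems, labor, and leadership dynamics.",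
     "New weekly: where AI, labor, and systems strategy collide.")
  (PySem.Str.slice st.1 none (some 70), PySem.Str.slice st.2.1 none (some 155), st.2.2)

-- ===== PORT B =====
-- 'for line in reversed(lines): if …: return …; return default'
def pvLastField (lines : List String) (pre dflt : String) : String :=
  match lines.reverse.find? (fun line => PySem.Str.startswith (PySem.Str.lower line) pre) with
  | some line => pvExtract line
  | none => dflt

def parse_title_meta_alt (text : String) : String × String × String :=
  let lines := PySem.Str.splitlines text
  let title := pvLastField lines "seo title:" "Weekly AI Systems Brief"
  let metaD := pvLastField lines "meta description:"
      "Weekly analysis across AI, systems, labor, and leadership dynamics."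
  let social := pvLastField lines "suggested social headline:"
      "New weekly: where AI, labor, and systems strategy collide."
  (PySem.Str.slice title none (some 70), PySem.Str.slice metaD none (some 155), social)

-- ===== PRECONDITION & SPEC =====
def Spec_parse_title_meta (text : String) (out : String × String × String) : Prop := out = parse_title_meta_alt text
instance (text : String) (out : String × String × String) : Decidable (Spec_parse_title_meta text out) := by unfold Spec_parse_title_meta; infer_instance

-- ===== CLAIM (what is proved, stated in full; the proofs are below) =====
def Claim_equal_parse_title_meta : Prop := ∀ (text : String), Dom_parse_title_meta text → Spec_parse_title_meta text (parse_title_meta text)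

-- ===== LEMMAS AND PROOFS =====

-- one-variable view of A's loop
def pvScan (p : String → Bool) (a0 : String) (lines : List String) : String :=
  lines.foldl (fun a line => if p line then pvExtract line else a) a0

def pvP1 (line : String) : Bool := PySem.Str.startswith (PySem.Str.lower line) "seo title:"
def pvP2 (line : String) : Bool := PySem.Str.startswith (PySem.Str.lower line) "meta description:"
def pvP3 (line : String) : Bool := PySem.Str.startswith (PySem.Str.lower line) "suggested social headline:"

theorem pv_fold_components (lines : List String) (st : String × String × String) :
    lines.foldl pvStep st
    = (pvScan pvP1 st.1 lines, pvScan pvP2 st.2.1 lines, pvScan pvP3 st.2.2 lines) := by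
  induction lines generalizing st with
  | nil => simp [pvScan]
  | cons x xs ih =>
    simp only [List.foldl_cons, pvScan, ih, pvStep]
    by_cases h1 : pvP1 x <;> by_cases h2 : pvP2 x <;> by_cases h3 : pvP3 x <;>
      simp_all [pvP1, pvP2, pvP3]

theorem pv_scan_eq_find (p : String → Bool) (a0 : String) (lines : List String) :
    pvScan p a0 lines =
      (match lines.reverse.find? p with
       | some line => pvExtract line
       | none => a0) := by
  induction lines generalizing a0 with
  | nil => simp [pvScan]
  | cons x xs ih =>
    simp only [pvScan, List.foldl_cons] at *
    rw [ih]
    cases hf : xs.reverse.find? p with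
    | some l => simp [List.find?_append, hf]
    | none =>
      by_cases hx : p x <;> simp [List.find?_append, hf, hx]

-- ===== VERDICT (by name: the statement is the Claim_ definition above) =====
theorem parse_title_meta_spec : Claim_equal_parse_title_meta := by
  intro text _
  show parse_title_meta text = parse_title_meta_alt text
  simp only [parse_title_meta, parse_title_meta_alt, pvLastField, pv_fold_components,
    pv_scan_eq_find]
  rfl
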